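-- pv_equiv track=rewrite | github.com/twistkim/oliveyoungBot | runner.py | iter_round_robin_once
-- ===== SOURCE A (Python) =====
-- from typing import Dict, List, Tuple, Iterator
--
-- def iter_round_robin_once(buckets: List[Tuple[str, List[str]]], positions: List[int]) -> Iterator[Tuple[str, str, int]]:
--     """Yield each remaining keyword exactly once, in round-robin order.
--
--     Yields: (category, keyword, index_in_category)
--     """
--     n = len(buckets)
--     remaining = True
--     idx = 0
--
--     while remaining:
--         remaining = False
--         for _ in range(n):
--             category, kws = buckets[idx]
--             p = positions[idx]
--             if p < len(kws):
--                 remaining = True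
--                 kw = kws[p]
--                 yield category, kw, p
--                 positions[idx] = p + 1
--             idx = (idx + 1) % n
-- ===== SOURCE B (Python) =====
-- def iter_round_robin_once(buckets, positions):
--     """Yield each remaining keyword exactly once, in round-robin order.
--
--     Alternative formulation: keep a list of still-active bucket indices and
--     drop a bucket as soon as it is exhausted, instead of re-scanning all n
--     buckets every round.  Mutates `positions` exactly like the original.
--     """
--     n = len(buckets)
--     active = [i for i in range(n) if positions[i] < len(buckets[i][1])]
--     while active:
--         nxt = []
--         for i in active:
--             category, kws = buckets[i]
--             p = positions[i]
--             yield category, kws[p], p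
--             positions[i] = p + 1
--             if p + 1 < len(kws):
--                 nxt.append(i)
--         active = nxt
-- ===== Notes on version B (the rewrite author's own statement) =====
-- stated objective: alternative
-- what changed: Instead of rescanning all n buckets every round (A's for _ in range(n) with modular idx arithmetic and a 'remaining' flag), B keeps a list of still-active bucket indices, rebuilds it each round with only the buckets that still have keywords, and stops as soon as it is empty.
import Mathlib
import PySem

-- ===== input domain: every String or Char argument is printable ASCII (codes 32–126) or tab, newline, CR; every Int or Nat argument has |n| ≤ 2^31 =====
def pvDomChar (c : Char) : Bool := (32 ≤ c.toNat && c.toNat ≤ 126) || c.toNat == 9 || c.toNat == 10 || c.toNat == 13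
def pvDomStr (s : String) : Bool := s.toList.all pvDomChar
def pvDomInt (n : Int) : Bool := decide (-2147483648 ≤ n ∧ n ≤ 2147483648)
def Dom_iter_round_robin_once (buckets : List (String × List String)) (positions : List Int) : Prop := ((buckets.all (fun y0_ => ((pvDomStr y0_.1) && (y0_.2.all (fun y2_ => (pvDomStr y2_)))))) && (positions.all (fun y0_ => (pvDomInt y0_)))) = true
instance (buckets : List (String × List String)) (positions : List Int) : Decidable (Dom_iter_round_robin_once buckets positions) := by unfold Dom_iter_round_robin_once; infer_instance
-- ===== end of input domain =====

-- B replaces A's rescan of all n buckets every round by a list of still-active bucket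
-- indices that is pruned as buckets exhaust (objective: alternative).  Both A and B are
-- Python generators that advance `positions` in place in the same way; the equivalence
-- proved here is about the yielded sequence (the returned list).

-- ===== PORT A =====
-- shared loop bound: on inputs satisfying Pre_, each while-loop runs at most
-- (total remaining keywords)+1 rounds; this fuel only totalises the transliterated loops.
def pvFuel (buckets : List (String × List String)) (positions : List Int) : Nat :=
  (List.range buckets.length).foldl
    (fun s i => s + ((((buckets[i]?).getD ("", [])).2.length : Int) - (positions[i]?).getD 0).toNat) 0 + 1

-- the `for _ in range(n)` body: k steps left, state (positions, idx, remaining, out)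
def pvAInner (buckets : List (String × List String)) (n : Int) :
    Nat → List Int → Int → Bool → List (String × String × Int) →
    List Int × Int × Bool × List (String × String × Int)
  | 0, pos, idx, rem, out => (pos, idx, rem, out)
  | k+1, pos, idx, rem, out =>
    let cat_kws := PySem.List.pyGetD buckets idx ("", [])
    let p := PySem.List.pyGetD pos idx 0
    if p < (cat_kws.2.length : Int) then
      pvAInner buckets n k (PySem.List.pySetD pos idx (p+1)) (PySem.Int.mod (idx+1) n) true
        (out ++ [(cat_kws.1, PySem.List.pyGetD cat_kws.2 p "", p)])
    else
      pvAInner buckets n k pos (PySem.Int.mod (idx+1) n) rem out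

-- the `while remaining` loop
def pvAOuter (buckets : List (String × List String)) (n : Int) :
    Nat → List Int → Int → List (String × String × Int) → List (String × String × Int)
  | 0, _, _, out => out
  | f+1, pos, idx, out =>
    let r := pvAInner buckets n n.toNat pos idx false out
    if r.2.2.1 then pvAOuter buckets n f r.1 r.2.1 r.2.2.2 else r.2.2.2

def iter_round_robin_once (buckets : List (String × List String)) (positions : List Int) : List (String × String × Int) :=
  pvAOuter buckets (buckets.length : Int) (pvFuel buckets positions) positions 0 []

-- ===== PORT B =====
-- one round over the active index list; returns (positions', nxt, out')
def pvBRound (buckets : List (String × List String)) :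
    List Int → List Int → List (String × String × Int) →
    List Int × List Int × List (String × String × Int)
  | [], pos, out => (pos, [], out)
  | i :: rest, pos, out =>
    let cat_kws := PySem.List.pyGetD buckets i ("", [])
    let p := PySem.List.pyGetD pos i 0
    let out' := out ++ [(cat_kws.1, PySem.List.pyGetD cat_kws.2 p "", p)]
    let pos' := PySem.List.pySetD pos i (p+1)
    let r := pvBRound buckets rest pos' out'
    (r.1, (if p + 1 < (cat_kws.2.length : Int) then [i] else []) ++ r.2.1, r.2.2)

-- the `while active` loop
def pvBOuter (buckets : List (String × List String)) :
    Nat → List Int → List Int → List (String × String × Int) → List (String × String × Int)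
  | 0, _, _, out => out
  | f+1, active, pos, out =>
    if active.isEmpty then out
    else
      let r := pvBRound buckets active pos out
      pvBOuter buckets f r.2.1 r.1 r.2.2

def iter_round_robin_once_alt (buckets : List (String × List String)) (positions : List Int) : List (String × String × Int) :=
  let n := buckets.length
  let active := (PySem.List.pyRange 0 n 1).filter
    (fun i => PySem.List.pyGetD positions i 0 < ((PySem.List.pyGetD buckets i ("", [])).2.length : Int))
  pvBOuter buckets (pvFuel buckets positions) active positions []

-- ===== PRECONDITION & SPEC =====
-- Pre_ is exactly where Python A returns normally: positions must cover every bucket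
-- (else positions[idx] raises IndexError) and no cursor may lie below -len(kws)
-- (else kws[p] raises IndexError the first time that bucket is visited).
def Pre_iter_round_robin_once (buckets : List (String × List String)) (positions : List Int) : Prop :=
  buckets.length ≤ positions.length ∧
  ∀ i < buckets.length, -(((buckets[i]?).getD ("", [])).2.length : Int) ≤ (positions[i]?).getD 0
instance (buckets : List (String × List String)) (positions : List Int) : Decidable (Pre_iter_round_robin_once buckets positions) := by unfold Pre_iter_round_robin_once; infer_instance

def pvWitness_iter_round_robin_once : (List (String × List String)) × List Int :=
  ([("skin", ["toner", "serum"]), ("hair", ["shampoo"])], [0, 0])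

def Spec_iter_round_robin_once (buckets : List (String × List String)) (positions : List Int) (out : List (String × String × Int)) : Prop := out = iter_round_robin_once_alt buckets positions
instance (buckets : List (String × List String)) (positions : List Int) (out : List (String × String × Int)) : Decidable (Spec_iter_round_robin_once buckets positions out) := by unfold Spec_iter_round_robin_once; infer_instance

-- ===== CLAIM (what is proved, stated in full; the proofs are below) =====
def Claim_equal_iter_round_robin_once : Prop := ∀ (buckets : List (String × List String)) (positions : List Int), Dom_iter_round_robin_once buckets positions → Pre_iter_round_robin_once buckets positions → Spec_iter_round_robin_once buckets positions (iter_round_robin_once buckets positions)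

-- ===== LEMMAS AND PROOFS =====

-- "bucket i still has a keyword left", as a function of the current positions
def pvAct (buckets : List (String × List String)) (pos : List Int) (i : Int) : Bool :=
  PySem.List.pyGetD pos i 0 < ((PySem.List.pyGetD buckets i ("", [])).2.length : Int)

lemma pvGet_set_ne (pos : List Int) (i j v : Int) (hi : 0 ≤ i) (hj : 0 ≤ j) (hne : i ≠ j) :
    PySem.List.pyGetD (PySem.List.pySetD pos j v) i 0 = PySem.List.pyGetD pos i 0 := by
  rw [PySem.List.pySetD_of_nonneg pos v hj]
  unfold PySem.List.pyGetD
  rw [PySem.List.pyGet?_of_nonneg _ hi, PySem.List.pyGet?_of_nonneg _ hi]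
  rw [List.getElem?_set_ne (by omega)]

lemma pvGet_set_self (pos : List Int) (j v : Int) (hj : 0 ≤ j) (hlt : j < (pos.length : Int)) :
    PySem.List.pyGetD (PySem.List.pySetD pos j v) j 0 = v := by
  rw [PySem.List.pySetD_of_nonneg pos v hj]
  unfold PySem.List.pyGetD
  rw [PySem.List.pyGet?_of_nonneg _ hj]
  rw [List.getElem?_set_self (by omega)]
  rfl

lemma pvAct_set_ne (buckets : List (String × List String)) (pos : List Int) (i j v : Int)
    (hi : 0 ≤ i) (hj : 0 ≤ j) (hne : i ≠ j) :
    pvAct buckets (PySem.List.pySetD pos j v) i = pvAct buckets pos i := by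
  simp [pvAct, pvGet_set_ne pos i j v hi hj hne]

lemma pvBRound_length (buckets : List (String × List String)) :
    ∀ (l : List Int) (pos : List Int) (out : List (String × String × Int)),
      (pvBRound buckets l pos out).1.length = pos.length := by
  intro l
  induction l with
  | nil => intro pos out; rfl
  | cons j rest ih =>
    intro pos out
    simp only [pvBRound]
    rw [ih]
    exact PySem.List.length_pySetD pos j _

-- positions are untouched at indices outside the processed list
lemma pvBRound_get_notMem (buckets : List (String × List String)) :
    ∀ (l : List Int) (pos : List Int) (out : List (String × String × Int)) (i : Int),
      0 ≤ i → (∀ j ∈ l, 0 ≤ j) → i ∉ l →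
      PySem.List.pyGetD (pvBRound buckets l pos out).1 i 0 = PySem.List.pyGetD pos i 0 := by
  intro l
  induction l with
  | nil => intro pos out i _ _ _; rfl
  | cons j rest ih =>
    intro pos out i hi hnn hmem
    simp only [pvBRound]
    rw [ih _ _ i hi (fun x hx => hnn x (List.mem_cons_of_mem _ hx))
        (fun h => hmem (List.mem_cons_of_mem _ h))]
    exact pvGet_set_ne pos i j _ hi (hnn j (List.mem_cons_self)) (fun h => hmem (h ▸ List.mem_cons_self))

-- the nxt list built by a B-round is the filter of l through the updated positions
lemma pvBRound_nxt (buckets : List (String × List String)) :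
    ∀ (l : List Int) (pos : List Int) (out : List (String × String × Int)),
      l.Pairwise (· < ·) → (∀ j ∈ l, 0 ≤ j ∧ j < (pos.length : Int)) →
      (pvBRound buckets l pos out).2.1 = l.filter (pvAct buckets (pvBRound buckets l pos out).1) := by
  intro l
  induction l with
  | nil => intro pos out _ _; rfl
  | cons j rest ih =>
    intro pos out hpw hb
    have hj0 : 0 ≤ j := (hb j List.mem_cons_self).1
    have hjlen : j < (pos.length : Int) := (hb j List.mem_cons_self).2
    have hrest : ∀ x ∈ rest, j < x := by
      intro x hx; exact (List.pairwise_cons.mp hpw).1 x hx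
    simp only [pvBRound, List.filter_cons]
    set p := PySem.List.pyGetD pos j 0 with hp
    set pos' := PySem.List.pySetD pos j (p+1) with hpos'
    have hlen' : (pos'.length : Int) = pos.length := by
      rw [hpos', PySem.List.length_pySetD]
    have hbr : ∀ x ∈ rest, 0 ≤ x ∧ x < (pos'.length : Int) := by
      intro x hx
      refine ⟨(hb x (List.mem_cons_of_mem _ hx)).1, ?_⟩
      rw [hlen']; exact (hb x (List.mem_cons_of_mem _ hx)).2
    set out' := out ++ [((PySem.List.pyGetD buckets j ("", [])).1,
        PySem.List.pyGetD (PySem.List.pyGetD buckets j ("", [])).2 p "", p)] with hout'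
    have ihr := ih pos' out' (List.pairwise_cons.mp hpw).2 hbr
    -- final positions of the whole round agree with pos' at j
    have hfin : PySem.List.pyGetD (pvBRound buckets rest pos' out').1 j 0 = p + 1 := by
      rw [pvBRound_get_notMem buckets rest pos' out' j hj0
          (fun x hx => (hbr x hx).1) (fun h => absurd (hrest j h) (lt_irrefl j))]
      exact pvGet_set_self pos j (p+1) hj0 hjlen
    have hact : pvAct buckets (pvBRound buckets rest pos' out').1 j
        = decide (p + 1 < ((PySem.List.pyGetD buckets j ("", [])).2.length : Int)) := by
      simp only [pvAct, hfin]
    rw [ihr, hact]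
    by_cases hc : p + 1 < ((PySem.List.pyGetD buckets j ("", [])).2.length : Int) <;>
      simp [hc]

lemma pvMod_small (a b : Int) (h0 : 0 ≤ a) (hb : a < b) : PySem.Int.mod a b = a := by
  rw [PySem.Int.mod_eq_emod_of_pos (by omega)]
  exact Int.emod_eq_of_lt h0 hb

-- one A-round starting at index j equals one B-round over the active indices in [j, j+k)
lemma pvInner_eq (buckets : List (String × List String)) (n : Int) (hn : 0 < n) :
    ∀ (k : Nat) (j : Int) (pos : List Int) (rem : Bool) (out : List (String × String × Int)),
      0 ≤ j → j < n → j + k ≤ n →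
      pvAInner buckets n k pos j rem out =
        (let l := (PySem.List.pyRange j (j + k) 1).filter (pvAct buckets pos)
         let r := pvBRound buckets l pos out
         (r.1, (if k = 0 then j else PySem.Int.mod (j + (k : Int)) n), rem || !l.isEmpty, r.2.2)) := by
  intro k
  induction k with
  | zero =>
    intro j pos rem out hj0 hjn hjk
    simp [pvAInner, pvBRound]
  | succ k ih =>
    intro j pos rem out hj0 hjn hjk
    have hcons : PySem.List.pyRange j (j + ((k:Int)+1)) 1
        = j :: PySem.List.pyRange (j+1) (j + ((k:Int)+1)) 1 :=
      PySem.List.pyRange_one_cons (by omega)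
    have hcast : j + ((k+1 : Nat) : Int) = j + ((k:Int)+1) := by push_cast; ring
    simp only [pvAInner]
    set p := PySem.List.pyGetD pos j 0 with hp
    by_cases hc : p < ((PySem.List.pyGetD buckets j ("", [])).2.length : Int)
    · -- active head
      rw [if_pos hc]
      set pos' := PySem.List.pySetD pos j (p+1) with hpos'
      set out' := out ++ [((PySem.List.pyGetD buckets j ("", [])).1,
          PySem.List.pyGetD (PySem.List.pyGetD buckets j ("", [])).2 p "", p)] with hout'
      have hfilter : (PySem.List.pyRange (j+1) (j + ((k:Int)+1)) 1).filter (pvAct buckets pos')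
          = (PySem.List.pyRange (j+1) (j + ((k:Int)+1)) 1).filter (pvAct buckets pos) := by
        apply List.filter_congr
        intro x hx
        have hxr := (PySem.List.mem_pyRange_one).mp hx
        exact pvAct_set_ne buckets pos x j (p+1) (by omega) hj0 (by omega)
      have hl : (PySem.List.pyRange j (j + ((k:Int)+1)) 1).filter (pvAct buckets pos)
          = j :: (PySem.List.pyRange (j+1) (j + ((k:Int)+1)) 1).filter (pvAct buckets pos) := by
        rw [hcons, List.filter_cons, if_pos]
        simpa [pvAct] using hc
      by_cases hjn1 : j + 1 < n
      · have ihr := ih (j+1) pos' true out' (by omega) hjn1 (by push_cast at hjk ⊢; omega)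
        rw [PySem.Int.mod_eq_emod_of_pos hn, Int.emod_eq_of_lt (by omega) hjn1] at *
        rw [ihr]
        have hrange : (j+1) + (k:Int) = j + ((k:Int)+1) := by ring
        simp only [hrange, hfilter]
        rw [hcast, hl]
        simp only [pvBRound, List.isEmpty_cons]
        by_cases hk0 : k = 0
        · subst hk0
          simp [pvMod_small (j+1) n (by omega) hjn1]
          exact ⟨rfl, rfl⟩
        · simp [hk0]
          refine ⟨rfl, ?_, rfl⟩
          rw [PySem.Int.mod_eq_emod_of_pos hn]
      · -- j+1 = n, hence k = 0
        have hjn2 : j + 1 = n := by omega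
        have hk0 : k = 0 := by push_cast at hjk; omega
        subst hk0
        have hm0 : PySem.Int.mod (j+1) n = 0 := by
          rw [hjn2, PySem.Int.mod_eq_emod_of_pos hn]; simp
        rw [hm0]
        simp only [pvAInner, hcast]
        rw [hl]
        simp only [pvBRound]
        have hemp : PySem.List.pyRange (j+1) (j + ((0:Int)+1)) 1 = [] :=
          PySem.List.pyRange_one_eq_nil (by omega)
        simp
        exact ⟨rfl, hm0.symm, rfl⟩
    · -- inactive head
      rw [if_neg hc]
      have hl : (PySem.List.pyRange j (j + ((k:Int)+1)) 1).filter (pvAct buckets pos)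
          = (PySem.List.pyRange (j+1) (j + ((k:Int)+1)) 1).filter (pvAct buckets pos) := by
        rw [hcons, List.filter_cons, if_neg]
        simpa [pvAct] using hc
      by_cases hjn1 : j + 1 < n
      · have ihr := ih (j+1) pos rem out (by omega) hjn1 (by push_cast at hjk ⊢; omega)
        rw [pvMod_small (j+1) n (by omega) hjn1, ihr]
        have hrange : (j+1) + (k:Int) = j + ((k:Int)+1) := by ring
        simp only [hrange, hcast, hl]
        by_cases hk0 : k = 0
        · subst hk0
          simp [pvMod_small (j+1) n (by omega) hjn1]
        · simp
          exact fun h => absurd h hk0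
      · have hjn2 : j + 1 = n := by omega
        have hk0 : k = 0 := by push_cast at hjk; omega
        subst hk0
        have hm : PySem.Int.mod (j+1) n = 0 := by
          rw [hjn2, PySem.Int.mod_eq_emod_of_pos hn]; simp
        rw [hm]
        simp only [pvAInner, hcast]
        rw [hl]
        have hemp : PySem.List.pyRange (j+1) (j + ((0:Int)+1)) 1 = [] :=
          PySem.List.pyRange_one_eq_nil (by omega)
        simp [pvBRound]
        exact hm.symm

-- the two while-loops agree, given positions covering every bucket
lemma pvOuter_eq (buckets : List (String × List String)) :
    ∀ (f : Nat) (pos : List Int) (out : List (String × String × Int)),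
      buckets.length ≤ pos.length →
      pvAOuter buckets (buckets.length : Int) f pos 0 out =
        pvBOuter buckets f
          ((PySem.List.pyRange 0 (buckets.length : Int) 1).filter (pvAct buckets pos)) pos out := by
  intro f
  induction f with
  | zero => intro pos out _; rfl
  | succ f ih =>
    intro pos out hlen
    by_cases hn : buckets.length = 0
    · simp only [pvAOuter, hn, Int.toNat_natCast, pvAInner]
      have : PySem.List.pyRange 0 ((0:Nat) : Int) 1 = [] :=
        PySem.List.pyRange_one_eq_nil (by omega)
      simp [pvBOuter]
    · have hn' : (0:Int) < (buckets.length : Int) := by omega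
      have hinner := pvInner_eq buckets (buckets.length : Int) hn'
        (buckets.length) 0 pos false out le_rfl hn' (by omega)
      have hknz : buckets.length ≠ 0 := hn
      simp only [pvAOuter, Int.toNat_natCast]
      rw [hinner]
      simp only [zero_add, if_neg hknz, Bool.false_or]
      set l := (PySem.List.pyRange 0 ((buckets.length : Nat) : Int) 1).filter (pvAct buckets pos) with hldef
      set r := pvBRound buckets l pos out with hrdef
      by_cases hl : l.isEmpty
      · -- silent round: no active bucket
        have hle : l = [] := List.isEmpty_iff.mp hl
        have hr : r = (pos, [], out) := by rw [hrdef, hle]; rfl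
        simp [pvBOuter, hl, hr]
      · -- at least one active bucket
        simp only [hl, Bool.not_false, if_pos]
        have hmem : ∀ j ∈ l, 0 ≤ j ∧ j < ((pos.length : Nat) : Int) := by
          intro j hj
          have := PySem.List.mem_pyRange_one.mp (List.mem_of_mem_filter hj)
          omega
        have hpw : l.Pairwise (· < ·) :=
          (PySem.List.pairwise_lt_pyRange_one _ _).sublist (List.filter_sublist)
        have hnxt := pvBRound_nxt buckets l pos out hpw hmem
        have hract : (PySem.List.pyRange 0 ((buckets.length : Nat) : Int) 1).filter (pvAct buckets r.1)
            = r.2.1 := by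
          rw [hnxt, ← hrdef, List.filter_filter]
          apply List.filter_congr
          intro x hx
          have hx0 : 0 ≤ x ∧ x < (buckets.length : Int) := by
            have := PySem.List.mem_pyRange_one.mp hx
            omega
          by_cases hax : pvAct buckets pos x
          · simp [hax]
          · have hxl : x ∉ l := by
              rw [hldef]
              intro hc
              exact hax (List.of_mem_filter hc)
            have : pvAct buckets r.1 x = pvAct buckets pos x := by
              unfold pvAct
              rw [hrdef, pvBRound_get_notMem buckets l pos out x hx0.1
                  (fun j hj => (hmem j hj).1) hxl]
            simp [this, hax]
        have hrlen : buckets.length ≤ r.1.length := by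
          rw [hrdef, pvBRound_length]; exact hlen
        have hmm : PySem.Int.mod ((buckets.length : Nat) : Int) ((buckets.length : Nat) : Int) = 0 := by
          rw [PySem.Int.mod_eq_emod_of_pos hn']; simp
        rw [hmm, ih r.1 r.2.2 hrlen, hract]
        simp [pvBOuter, hl, ← hrdef]

-- ===== VERDICT (by name: the statement is the Claim_ definition above) =====
theorem iter_round_robin_once_spec : Claim_equal_iter_round_robin_once := by
  intro buckets positions _ hpre
  unfold Spec_iter_round_robin_once iter_round_robin_once iter_round_robin_once_alt
  exact pvOuter_eq buckets (pvFuel buckets positions) positions [] hpre.1
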